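-- pv_equiv track=rewrite | github.com/alphafan/Data_Structure_And_Algorithms | array/find_maximum_value_of_Sum( i*arr[i])_with_only_rotations_on_given_array_allowed.py | maxRotateSum
-- ===== SOURCE A (Python) =====
-- def maxRotateSum(arr):
--     # stores sum of arr[i]
--     arrSum = 0
--
--     # stores sum of i*arr[i]
--     currVal = 0
--
--     n = len(arr)
--
--     for i in range(0, n):
--         arrSum = arrSum + arr[i]
--         currVal = currVal + (i * arr[i])
--
--     # initialize result
--     maxVal = currVal
--
--     # try all rotations one by one and find the maximum
--     # rotation sum
--     for j in range(1, n):
--         currVal = currVal + arrSum - n * arr[n - j]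
--         if currVal > maxVal:
--             maxVal = currVal
--
--     # return result
--     return maxVal
-- ===== SOURCE B (Python) =====
-- def maxRotateSum(arr):
--     n = len(arr)
--     if n == 0:
--         return 0
--     return max(
--         sum(i * v for i, v in enumerate(arr[n - k:] + arr[:n - k]))
--         for k in range(n)
--     )
-- ===== Notes on version B (the rewrite author's own statement) =====
-- stated objective: alternative
-- what changed: Replaced A's O(n) incremental currVal += arrSum - n*arr[n-j] update with a direct brute force: for each rotation k materialize the rotated list and sum i*rot[i], taking max over all rotations.
import Mathlib
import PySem

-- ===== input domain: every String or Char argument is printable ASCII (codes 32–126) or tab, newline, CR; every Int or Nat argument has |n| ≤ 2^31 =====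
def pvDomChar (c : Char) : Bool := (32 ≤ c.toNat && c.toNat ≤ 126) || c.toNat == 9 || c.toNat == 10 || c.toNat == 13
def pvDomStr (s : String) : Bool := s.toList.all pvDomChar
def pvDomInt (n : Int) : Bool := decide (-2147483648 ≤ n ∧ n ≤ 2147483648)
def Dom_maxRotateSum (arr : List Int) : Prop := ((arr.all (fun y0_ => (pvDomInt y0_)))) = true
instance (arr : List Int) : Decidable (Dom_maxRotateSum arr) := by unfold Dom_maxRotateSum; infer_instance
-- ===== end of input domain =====

-- B replaces A's incremental rotation-sum recurrence by a direct brute-force max over all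
-- rotations (alternative decomposition, not faster); B matches A's return value exactly.

-- ===== PORT A =====
def maxRotateSum (arr : List Int) : Int :=
  let n : Int := arr.length
  -- first loop: arrSum and currVal accumulated together
  let sc := (PySem.List.pyRange 0 n 1).foldl
      (fun (p : Int × Int) i =>
        (p.1 + PySem.List.pyGetD arr i 0, p.2 + i * PySem.List.pyGetD arr i 0)) (0, 0)
  -- second loop: (currVal, maxVal)
  let cm := (PySem.List.pyRange 1 n 1).foldl
      (fun (p : Int × Int) j =>
        let c := p.1 + sc.1 - n * PySem.List.pyGetD arr (n - j) 0
        (c, if c > p.2 then c else p.2)) (sc.2, sc.2)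
  cm.2

-- ===== PORT B =====
def maxRotateSum_alt (arr : List Int) : Int :=
  let n : Int := arr.length
  if n = 0 then 0
  else
    ((PySem.List.max?
      ((PySem.List.pyRange 0 n 1).map (fun k =>
        ((PySem.List.enumerate
            (PySem.List.slice arr (some (n - k)) none ++ PySem.List.slice arr none (some (n - k)))
            0).map (fun p => p.1 * p.2)).sum))
      (fun y => y)).getD 0)

-- ===== PRECONDITION & SPEC =====
def Spec_maxRotateSum (arr : List Int) (out : Int) : Prop := out = maxRotateSum_alt arr
instance (arr : List Int) (out : Int) : Decidable (Spec_maxRotateSum arr out) := by unfold Spec_maxRotateSum; infer_instance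

-- ===== CLAIM (what is proved, stated in full; the proofs are below) =====
def Claim_equal_maxRotateSum : Prop := ∀ (arr : List Int), Dom_maxRotateSum arr → Spec_maxRotateSum arr (maxRotateSum arr)

-- ===== LEMMAS AND PROOFS =====

/-- weighted sum Σ (i+j)*l[j], the value `sum(i*v for i,v in enumerate(l, i))`. -/
def wsumAux : Nat → List Int → Int
  | _, [] => 0
  | i, a :: t => i * a + wsumAux (i + 1) t

def wsum (l : List Int) : Int := wsumAux 0 l

/-- right rotation by k of arr -/
def rotR (arr : List Int) (k : Nat) : List Int :=
  arr.drop (arr.length - k) ++ arr.take (arr.length - k)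

theorem rotR_zero (arr : List Int) : rotR arr 0 = arr := by simp [rotR]

theorem wsumAux_succ (l : List Int) : ∀ i : Nat, wsumAux (i + 1) l = l.sum + wsumAux i l := by
  induction l with
  | nil => intro i; simp [wsumAux]
  | cons a t ih => intro i; simp only [wsumAux, List.sum_cons, ih (i + 1), ih i]; push_cast; ring

theorem wsum_cons (a : Int) (l : List Int) : wsum (a :: l) = l.sum + wsum l := by
  simp [wsum, wsumAux, wsumAux_succ]

theorem wsumAux_append_singleton (l : List Int) (a : Int) :
    ∀ i : Nat, wsumAux i (l ++ [a]) = wsumAux i l + (i + l.length) * a := by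
  induction l with
  | nil => intro i; simp [wsumAux]
  | cons b t ih => intro i; simp only [List.cons_append, wsumAux, ih (i + 1), List.length_cons]; push_cast; ring

theorem wsum_append_singleton (l : List Int) (a : Int) :
    wsum (l ++ [a]) = wsum l + l.length * a := by
  simp [wsum, wsumAux_append_singleton]

theorem enumerate_sum_eq_wsumAux (l : List Int) :
    ∀ i : Nat, ((PySem.List.enumerate l (i : Int)).map (fun p => p.1 * p.2)).sum = wsumAux i l := by
  induction l with
  | nil => intro i; simp [PySem.List.enumerate_nil, wsumAux]
  | cons a t ih =>
      intro i
      have := ih (i + 1)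
      push_cast at this
      simp [PySem.List.enumerate_cons, wsumAux, this]

/-- the rotation-step identity that A's second loop uses -/
theorem wsum_rotR_succ (arr : List Int) (k : Nat) (hk : k + 1 ≤ arr.length) :
    wsum (rotR arr (k + 1)) =
      wsum (rotR arr k) + arr.sum - arr.length * arr[arr.length - 1 - k]'(by omega) := by
  obtain ⟨m, hm⟩ : ∃ m, arr.length - 1 - k = m := ⟨_, rfl⟩
  have hmlt : m < arr.length := by omega
  have hmk : arr.length - (k + 1) = m := by omega
  have hsk : arr.length - k = m + 1 := by omega
  have htake : arr.take (m + 1) = arr.take m ++ [arr[m]'hmlt] := by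
    rw [List.take_add_one]; simp [List.getElem?_eq_getElem hmlt]
  have hdrop : arr.drop m = arr[m]'hmlt :: arr.drop (m + 1) := List.drop_eq_getElem_cons hmlt
  have hrotk : rotR arr k = (arr.drop (m + 1) ++ arr.take m) ++ [arr[m]'hmlt] := by
    rw [rotR, hsk, htake, ← List.append_assoc]
  have hrotk1 : rotR arr (k + 1) = arr[m]'hmlt :: (arr.drop (m + 1) ++ arr.take m) := by
    rw [rotR, hmk, hdrop, List.cons_append]
  have hlen : ((arr.drop (m + 1) ++ arr.take m) : List Int).length = arr.length - 1 := by
    simp [List.length_append]; omega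
  have hsum : ((arr.drop (m + 1) ++ arr.take m) : List Int).sum
      = arr.sum - arr[m]'hmlt := by
    have hsplit : (arr.take m).sum + (arr.drop m).sum = arr.sum := by
      rw [← List.sum_append, List.take_append_drop]
    rw [hdrop, List.sum_cons] at hsplit
    rw [List.sum_append]
    omega
  simp only [hm]
  rw [hrotk1, wsum_cons, hsum, hrotk, wsum_append_singleton, hlen]
  have hn1 : ((arr.length - 1 : Nat) : Int) = (arr.length : Int) - 1 := by omega
  rw [hn1]
  ring

/-- A's first loop computes (sum of the prefix, weighted sum of the prefix). -/
theorem loopA1 (arr : List Int) :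
    ∀ m : Nat, m ≤ arr.length →
      (PySem.List.pyRange 0 m 1).foldl
        (fun (p : Int × Int) i =>
          (p.1 + PySem.List.pyGetD arr i 0, p.2 + i * PySem.List.pyGetD arr i 0)) (0, 0)
        = ((arr.take m).sum, wsum (arr.take m)) := by
  intro m
  induction m with
  | zero => intro _; simp [wsum, wsumAux]
  | succ m ih =>
      intro hm
      have hm' : m < arr.length := by omega
      have hc : ((m : Int) + 1) = ((m + 1 : Nat) : Int) := by push_cast; ring
      rw [← hc, PySem.List.pyRange_one_succ_right (by positivity), List.foldl_append,
        ih (by omega), List.foldl_cons, List.foldl_nil]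
      have hget : PySem.List.pyGetD arr (m : Int) 0 = arr[m]'hm' := by
        simp [PySem.List.pyGetD_natCast, List.getD, List.getElem?_eq_getElem hm']
      have htake : arr.take (m + 1) = arr.take m ++ [arr[m]'hm'] := by
        rw [List.take_add_one]; simp [List.getElem?_eq_getElem hm']
      have hlen : (arr.take m).length = m := by simp [List.length_take]; omega
      rw [hget, htake, wsum_append_singleton, List.sum_append, List.sum_cons, List.sum_nil, hlen]
      ring_nf

/-- A's second loop: invariant linking (currVal, maxVal) to rotation sums. -/
theorem loopA2 (arr : List Int) (M : Int) :
    ∀ (c : Nat) (j : Nat), 1 ≤ j → j + c = arr.length →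
      (PySem.List.pyRange (j : Int) (arr.length : Int) 1).foldl
        (fun (p : Int × Int) jj =>
          let cv := p.1 + arr.sum - (arr.length : Int) * PySem.List.pyGetD arr ((arr.length : Int) - jj) 0
          (cv, if cv > p.2 then cv else p.2))
        (wsum (rotR arr (j - 1)), M)
      = (wsum (rotR arr (arr.length - 1)),
         ((List.range c).map (fun t => wsum (rotR arr (j + t)))).foldl max M) := by
  intro c
  induction c generalizing M with
  | zero =>
      intro j hj hjc
      have hj' : j = arr.length := by omega
      subst hj'
      rw [PySem.List.pyRange_one_eq_nil (le_refl _), List.foldl_nil]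
      simp
  | succ c ih =>
      intro j hj hjc
      obtain ⟨k, hk⟩ : ∃ k, j = k + 1 := ⟨j - 1, by omega⟩
      subst hk
      have hjlt : k + 1 < arr.length := by omega
      rw [PySem.List.pyRange_one_cons (by exact_mod_cast hjlt), List.foldl_cons]
      have hget : PySem.List.pyGetD arr ((arr.length : Int) - ((k + 1 : Nat) : Int)) 0
          = arr[arr.length - 1 - k]'(by omega) := by
        have hcast : ((arr.length : Int) - ((k + 1 : Nat) : Int)) = ((arr.length - 1 - k : Nat) : Int) := by
          push_cast; omega
        rw [hcast]
        simp [PySem.List.pyGetD_natCast, List.getD,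
          List.getElem?_eq_getElem (show arr.length - 1 - k < arr.length by omega)]
    -- step the state
      have hstep : wsum (rotR arr (k + 1 - 1)) + arr.sum
            - (arr.length : Int) * PySem.List.pyGetD arr ((arr.length : Int) - ((k + 1 : Nat) : Int)) 0
          = wsum (rotR arr (k + 1)) := by
        rw [hget, Nat.add_sub_cancel, wsum_rotR_succ arr k (by omega)]
      simp only [hstep]
      have hmax : (if wsum (rotR arr (k + 1)) > M then wsum (rotR arr (k + 1)) else M)
          = max M (wsum (rotR arr (k + 1))) := by
        split_ifs with h <;> omega
      have hc : (((k + 1 : Nat) : Int) + 1) = ((k + 2 : Nat) : Int) := by push_cast; ring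
      rw [hmax, hc]
      have hih := ih (max M (wsum (rotR arr (k + 1)))) (k + 2) (by omega) (by omega)
      rw [show k + 2 - 1 = k + 1 by omega] at hih
      rw [hih, List.range_succ_eq_map, List.map_cons, List.foldl_cons, List.map_map]
      have hfun : ((List.range c).map ((fun t => wsum (rotR arr (k + 1 + t))) ∘ Nat.succ))
          = (List.range c).map (fun t => wsum (rotR arr (k + 2 + t))) := by
        apply List.map_congr_left; intro t _
        simp only [Function.comp]
        congr 2
        omega
      rw [Nat.add_zero] at *
      congr 1
      rw [← hfun]

/-- B's per-rotation value is the weighted sum of the rotated list. -/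
theorem altVal (arr : List Int) (i : Nat) (hi : i < arr.length) :
    ((PySem.List.enumerate
        (PySem.List.slice arr (some ((arr.length : Int) - (i : Int))) none
          ++ PySem.List.slice arr none (some ((arr.length : Int) - (i : Int))))
        0).map (fun p => p.1 * p.2)).sum = wsum (rotR arr i) := by
  have hc : ((arr.length : Int) - (i : Int)) = ((arr.length - i : Nat) : Int) := by omega
  rw [hc, PySem.List.slice_from_natCast, PySem.List.slice_to_natCast]
  have h0 : ((0 : Nat) : Int) = (0 : Int) := by norm_num
  rw [← h0, enumerate_sum_eq_wsumAux]
  rfl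

-- ===== VERDICT (by name: the statement is the Claim_ definition above) =====
theorem maxRotateSum_spec : Claim_equal_maxRotateSum := by
  intro arr _
  unfold Spec_maxRotateSum maxRotateSum maxRotateSum_alt
  by_cases hne : arr = []
  · subst hne; decide
  · have hn : 0 < arr.length := List.length_pos_iff.mpr hne
    simp only [if_neg (show ¬ ((arr.length : Int) = 0) by exact_mod_cast Nat.pos_iff_ne_zero.mp hn)]
    -- A's first loop
    have h1 := loopA1 arr arr.length (le_refl _)
    rw [List.take_length] at h1
    rw [h1]
    -- A's second loop, starting at j = 1 with currVal = maxVal = wsum arr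
    have h2 := loopA2 arr (wsum arr) (arr.length - 1) 1 (le_refl _) (by omega)
    rw [show (1 : Nat) - 1 = 0 by rfl, rotR_zero] at h2
    rw [show ((1 : Nat) : Int) = (1 : Int) by norm_num] at h2
    rw [h2]
    -- B's side
    rw [PySem.List.pyRange_zero, Int.toNat_natCast, List.map_map]
    have hvals : (List.range arr.length).map
        ((fun k => ((PySem.List.enumerate
            (PySem.List.slice arr (some ((arr.length : Int) - k)) none
              ++ PySem.List.slice arr none (some ((arr.length : Int) - k))) 0).map
            (fun p => p.1 * p.2)).sum) ∘ (fun (k : Nat) => (k : Int)))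
        = (List.range arr.length).map (fun i => wsum (rotR arr i)) := by
      apply List.map_congr_left
      intro i hi
      rw [List.mem_range] at hi
      exact altVal arr i hi
    rw [hvals]
    obtain ⟨c, hcn⟩ : ∃ c, arr.length = c + 1 := ⟨arr.length - 1, by omega⟩
    rw [hcn, List.range_succ_eq_map, List.map_cons, PySem.List.max?_id_cons, Option.getD_some,
      List.map_map, rotR_zero]
    rw [show c + 1 - 1 = c by omega]
    dsimp only
    congr 1
    apply List.map_congr_left
    intro t _
    simp only [Function.comp]
    congr 2
    omega
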